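-- pv_equiv track=rewrite | github.com/0hhanum/algorithm_study | Line/1.py | solution
-- ===== SOURCE A (Python) =====
-- from collections import defaultdict
-- from math import ceil
--
-- def solution(logs):
--     table = defaultdict(set)
--     users = set()
--
--     for log in logs:
--         user, question = log.split()
--         table[question].add(user)
--         users.add(user)
--
--     user_num = len(users)
--     answer = sorted(list(filter(lambda x: len(table[x]) >= ceil(user_num / 2), table)))
--     return answer
-- ===== SOURCE B (Python) =====
-- def solution(logs):
--     split_logs = [log.split() for log in logs]
--     questions = sorted({q for _, q in split_logs})
--     threshold = -(-len({u for u, _ in split_logs}) // 2)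
--     answer = []
--     for q in questions:
--         answerers = {u for u, qq in split_logs if qq == q}
--         if len(answerers) >= threshold:
--             answer.append(q)
--     return answer
-- ===== Notes on version B (the rewrite author's own statement) =====
-- stated objective: alternative
-- what changed: B drops A's single-pass dict-of-user-sets grouping entirely: it splits the logs once, takes the sorted distinct questions, and for each question runs an independent scan over the split logs counting its distinct answerers against a ceil threshold computed as -(-n//2).
import Mathlib
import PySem

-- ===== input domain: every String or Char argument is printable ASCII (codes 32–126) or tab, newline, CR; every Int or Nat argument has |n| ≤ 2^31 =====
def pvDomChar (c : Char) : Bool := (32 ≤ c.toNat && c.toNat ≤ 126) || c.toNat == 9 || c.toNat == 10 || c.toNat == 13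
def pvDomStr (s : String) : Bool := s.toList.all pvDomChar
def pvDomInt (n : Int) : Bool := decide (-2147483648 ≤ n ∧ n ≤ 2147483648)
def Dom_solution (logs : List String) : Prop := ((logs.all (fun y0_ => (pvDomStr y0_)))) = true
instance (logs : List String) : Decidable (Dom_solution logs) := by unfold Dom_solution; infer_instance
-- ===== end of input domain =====

-- B abandons A's dict-of-user-sets grouping: it scans the split logs once per sorted distinct
-- question, counting that question's distinct answerers independently (objective: alternative
-- nested-scan algorithm; no grouping structure is built).

-- shared transliteration of the line 'user, question = log.split()' (exact on Pre_: exactly 2 parts)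
def pvSplit2 (log : String) : String × String :=
  (PySem.List.pyGetD (PySem.Str.split₀ log) 0 "", PySem.List.pyGetD (PySem.Str.split₀ log) 1 "")

-- ===== PORT A =====
def solution (logs : List String) : List String :=
  let st := logs.foldl
    (fun (acc : PySem.Dict String (PySem.Set String) × PySem.Set String) log =>
      (acc.1.modify (pvSplit2 log).2 PySem.Set.empty (fun s => PySem.Set.add s (pvSplit2 log).1),
       PySem.Set.add acc.2 (pvSplit2 log).1))
    (PySem.Dict.empty, PySem.Set.empty)
  -- ceil(user_num / 2) on a nonnegative int is (user_num + 1) / 2 (exact here: no float rounding at these sizes)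
  let userNum := st.2.length
  PySem.List.sorted
    ((st.1.keys).filter (fun q => decide ((userNum + 1) / 2 ≤ (st.1.getD q PySem.Set.empty).length)))
    (fun x => x) false

-- ===== PORT B =====
def solution_alt (logs : List String) : List String :=
  let splitLogs := logs.map pvSplit2
  let questions := PySem.List.sorted (PySem.Set.ofList (splitLogs.map Prod.snd)) (fun x => x) false
  -- '-(-n // 2)' — ceiling division written with Python's floor division
  let threshold : Int :=
    -(PySem.Int.floordiv (-((PySem.Set.ofList (splitLogs.map Prod.fst)).length : Int)) 2)
  questions.foldl
    (fun answer q =>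
      let answerers := PySem.Set.ofList ((splitLogs.filter (fun p => p.2 == q)).map Prod.fst)
      if threshold ≤ (answerers.length : Int) then answer ++ [q] else answer)
    []

-- ===== PRECONDITION & SPEC =====
-- Pre_ excludes exactly the logs on which 'user, question = log.split()' raises ValueError
def Pre_solution (logs : List String) : Prop :=
  ∀ log ∈ logs, (PySem.Str.split₀ log).length = 2
instance (logs : List String) : Decidable (Pre_solution logs) := by
  unfold Pre_solution; infer_instance

def pvWitness_solution : List String := ["alice q1", "bob q1", "alice q2"]

def Spec_solution (logs : List String) (out : List String) : Prop := out = solution_alt logs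
instance (logs : List String) (out : List String) : Decidable (Spec_solution logs out) := by
  unfold Spec_solution; infer_instance

-- ===== CLAIM (what is proved, stated in full; the proofs are below) =====
def Claim_equal_solution : Prop :=
  ∀ (logs : List String), Dom_solution logs → Pre_solution logs → Spec_solution logs (solution logs)

-- ===== LEMMAS AND PROOFS =====

-- A's loop over the logs, split: the product state decomposes into the dict fold and the
-- user-set fold over the extracted (user, question) pairs
lemma pv_splitA (logs : List String) (d : PySem.Dict String (PySem.Set String))
    (u : PySem.Set String) :
    logs.foldl
      (fun (acc : PySem.Dict String (PySem.Set String) × PySem.Set String) log =>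
        (acc.1.modify (pvSplit2 log).2 PySem.Set.empty (fun s => PySem.Set.add s (pvSplit2 log).1),
         PySem.Set.add acc.2 (pvSplit2 log).1))
      (d, u)
    = ((logs.map pvSplit2).foldl
        (fun d p => d.modify p.2 PySem.Set.empty (fun s => PySem.Set.add s p.1)) d,
       (logs.map pvSplit2).foldl (fun s p => PySem.Set.add s p.1) u) := by
  induction logs generalizing d u with
  | nil => rfl
  | cons h t ih => simpa using ih _ _

-- A's running user set is the distinct first components in order
lemma pv_users (l : List (String × String)) :
    l.foldl (fun s p => PySem.Set.add s p.1) PySem.Set.empty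
      = PySem.Set.ofList (l.map Prod.fst) := by
  rw [← PySem.Set.update_map_eq_foldl_add, PySem.Set.update_empty]

-- A's grouping loop: the user set stored at question q collects the first components of the
-- pairs whose second component is q, in order of occurrence
lemma pv_getD_foldl_tbl (l : List (String × String)) (d : PySem.Dict String (PySem.Set String))
    (q : String) :
    (l.foldl (fun d p => d.modify p.2 PySem.Set.empty (fun s => PySem.Set.add s p.1)) d).getD q
        PySem.Set.empty
      = PySem.Set.update (d.getD q PySem.Set.empty) ((l.filter (fun p => p.2 == q)).map Prod.fst) := by
  induction l generalizing d with
  | nil => simp [PySem.Set.update]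
  | cons p t ih =>
    rw [List.foldl_cons, ih, PySem.Dict.getD_modify]
    by_cases h : p.2 = q
    · simp [h, PySem.Set.update_cons]
    · simp [h, Ne.symm h]

-- A's Nat-arithmetic threshold test agrees with B's '-(-n // 2)' Int test
lemma pv_threshold (u m : Nat) :
    (decide ((u + 1) / 2 ≤ m))
      = decide (-(PySem.Int.floordiv (-(u : Int)) 2) ≤ (m : Int)) := by
  have h : -(PySem.Int.floordiv (-(u : Int)) 2) = (((u + 1) / 2 : Nat) : Int) := by
    rw [PySem.Int.neg_floordiv_neg_eq_iff_of_pos (by norm_num)]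
    constructor <;> [skip; skip] <;> push_cast <;> omega
  rw [h]
  simp only [decide_eq_decide]
  exact_mod_cast Iff.rfl

-- sorting the filtered distinct elements = filtering the sorted distinct elements
lemma pv_sorted_filter (xs : List String) (p : String → Bool) :
    PySem.List.sorted ((PySem.Set.ofList xs).filter p) (fun x => x) false
      = (PySem.List.sorted (PySem.Set.ofList xs) (fun x => x) false).filter p := by
  apply PySem.List.sorted_eq_of_perm_of_pairwise_lt
  · exact (PySem.List.sorted_perm _ _ _).filter p
  · exact List.Pairwise.sublist List.filter_sublist (PySem.List.sorted_ofList_pairwise_lt _)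

theorem pv_main (logs : List String) : solution logs = solution_alt logs := by
  simp only [solution, solution_alt]
  rw [pv_splitA, pv_users, PySem.List.foldl_append_ite_eq_filter, List.nil_append]
  set l := logs.map pvSplit2 with hl
  set tbl := l.foldl (fun d p => d.modify p.2 PySem.Set.empty (fun s => PySem.Set.add s p.1))
      PySem.Dict.empty with htbl
  have hkeys : tbl.keys = PySem.Set.ofList (l.map Prod.snd) := by
    rw [htbl, PySem.Dict.keys_foldl_modify_key l Prod.snd PySem.Set.empty
      (fun _ p => fun s => PySem.Set.add s p.1), PySem.Dict.keys_empty]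
    exact PySem.Set.update_empty _
  have hget : ∀ q, tbl.getD q PySem.Set.empty
      = PySem.Set.ofList ((l.filter (fun p => p.2 == q)).map Prod.fst) := by
    intro q
    rw [htbl, pv_getD_foldl_tbl, PySem.Dict.getD_empty, PySem.Set.update_empty]
  have hpred : ∀ q,
      (decide (((PySem.Set.ofList (l.map Prod.fst)).length + 1) / 2
          ≤ (tbl.getD q PySem.Set.empty).length))
      = decide (-(PySem.Int.floordiv (-((PySem.Set.ofList (l.map Prod.fst)).length : Int)) 2)
          ≤ ((PySem.Set.ofList ((l.filter (fun p => p.2 == q)).map Prod.fst)).length : Int)) := by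
    intro q
    rw [hget q, pv_threshold]
  rw [hkeys, List.filter_congr (fun q _ => hpred q), pv_sorted_filter]

-- ===== VERDICT (by name: the statement is the Claim_ definition above) =====
theorem solution_spec : Claim_equal_solution := by
  intro logs _ _
  unfold Spec_solution
  exact pv_main logs
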